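-- pv_equiv track=rewrite | github.com/Karaage-Cluster/python-tldap | tldap/dn.py | _numericoid
-- ===== SOURCE A (Python) =====
-- def _isDIGIT(char):
--     assert len(char) == 1
--     return char >= '0' and char <= '9'
--
-- def _number(value, i):
--     start = i
--
--     if i >= len(value):
--         return (None, start)
--
--     if not _isDIGIT(value[i]):
--         return (None, start)
--
--     if value[i] == "0":
--         i = i + 1
--         return (value[start:i], i)
--
--     while i < len(value) and _isDIGIT(value[i]):
--         i = i + 1
--
--     return (value[start:i], i)
--
-- def _numericoid(value, i):
--     start = i
--
--     while True:
--         (number, i) = _number(value, i)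
--         if number is None:
--             return (None, i)
--
--         if i >= len(value):
--             return (value[start:i], i)
--
--         if value[i] != ".":
--             return (value[start:i], i)
--         i = i + 1
-- ===== SOURCE B (Python) =====
-- import re
--
-- # OID = number ('.' number)*, where number = 0 | [1-9][0-9]*
-- _OID_RE = re.compile(r'(?:0|[1-9][0-9]*)(?:\.(?:0|[1-9][0-9]*))*')
--
-- def _numericoid(value, i):
--     m = _OID_RE.match(value[i:])
--     if m is None:
--         return (None, i)
--     end = i + m.end()
--     if end < len(value) and value[end] == '.':
--         # a dangling dot invalidates the parse; the failure position is past the dot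
--         return (None, end + 1)
--     return (value[i:end], end)
-- ===== Notes on version B (the rewrite author's own statement) =====
-- stated objective: idiomatic
-- what changed: Replaces the hand-written two-function character scanner (a while-True loop calling a per-number scanner) by a single anchored regex match for (0|[1-9][0-9]*)(\.(0|[1-9][0-9]*))* plus one trailing-dot check that yields A's failure position.
-- outside the precondition, e.g. on _numericoid('12', -1): A returns ('2', 2), B returns ('', 0); on _numericoid('ab', -5): A raises IndexError, B returns (None, -5)
import Mathlib
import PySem

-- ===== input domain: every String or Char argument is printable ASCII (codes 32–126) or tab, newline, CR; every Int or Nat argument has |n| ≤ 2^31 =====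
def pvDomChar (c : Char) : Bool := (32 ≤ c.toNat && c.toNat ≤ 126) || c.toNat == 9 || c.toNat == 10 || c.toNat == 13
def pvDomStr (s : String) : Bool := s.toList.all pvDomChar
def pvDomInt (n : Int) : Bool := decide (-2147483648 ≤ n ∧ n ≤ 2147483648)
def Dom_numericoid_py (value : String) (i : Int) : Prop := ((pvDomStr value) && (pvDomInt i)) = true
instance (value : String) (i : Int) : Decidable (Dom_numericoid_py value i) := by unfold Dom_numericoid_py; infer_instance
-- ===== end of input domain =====

-- B replaces A's hand-written two-function character scanner by a single anchored
-- regex match for number('.'number)* plus one trailing-dot check (objective: idiomatic).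

-- ===== PORT A =====

-- _isDIGIT
def aIsDigit (c : Char) : Bool := '0' ≤ c && c ≤ '9'

-- the `while i < len(value) and _isDIGIT(value[i])` loop of _number
-- (fuel makes the loop total; under Pre_ the loop advances i by 1 each step, so
-- fuel = 2*len+2 is never exhausted)
def aScan (s : List Char) (i : Int) : Nat → Int
  | 0 => i
  | fuel + 1 =>
    if (decide (i < (s.length : Int)) && (match PySem.List.pyGet? s i with
                               | some c => aIsDigit c
                               | none => false)) = true then
      aScan s (i + 1) fuel
    else i

-- _number (value[i] = none is IndexError, unreachable under Pre_)
def aNumber (s : List Char) (i : Int) : Option (List Char) × Int :=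
  let start := i
  if (s.length : Int) ≤ i then (none, start)
  else
    match PySem.List.pyGet? s i with
    | none => (none, start)   -- IndexError in Python; excluded by Pre_
    | some c =>
      if ¬ aIsDigit c then (none, start)
      else if c = '0' then (some (PySem.List.slice s (some start) (some (i + 1))), i + 1)
      else
        let j := aScan s (i + 1) (2 * s.length + 2)
        (some (PySem.List.slice s (some start) (some j)), j)

-- the `while True` loop of _numericoid
def aLoop (s : List Char) (start : Int) (i : Int) : Nat → Option (List Char) × Int
  | 0 => (none, i)
  | fuel + 1 =>
    match aNumber s i with
    | (none, i') => (none, i')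
    | (some _, i') =>
      if (s.length : Int) ≤ i' then (some (PySem.List.slice s (some start) (some i')), i')
      else
        match PySem.List.pyGet? s i' with
        | none => (none, i')   -- IndexError in Python; excluded by Pre_
        | some c =>
          if c ≠ '.' then (some (PySem.List.slice s (some start) (some i')), i')
          else aLoop s start (i' + 1) fuel

def numericoid_py (value : String) (i : Int) : Option String × Int :=
  let s := value.toList
  let r := aLoop s i i (2 * s.length + 2)
  (r.1.map String.mk, r.2)

-- ===== PORT B =====

-- greedy [0-9]* : (chars consumed, rest)
def bDigits : List Char → Nat × List Char
  | [] => (0, [])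
  | c :: cs => if ('0' ≤ c && c ≤ '9') then ((bDigits cs).1 + 1, (bDigits cs).2) else (0, c :: cs)

-- number = 0 | [1-9][0-9]*  (ordered alternation, as the regex engine tries it)
def bNum : List Char → Option (Nat × List Char)
  | [] => none
  | c :: cs =>
    if c = '0' then some (1, cs)
    else if ('0' ≤ c && c ≤ '9') then some ((bDigits cs).1 + 1, (bDigits cs).2)
    else none

theorem bDigits_len (l : List Char) : (bDigits l).2.length ≤ l.length := by
  induction l with
  | nil => simp [bDigits]
  | cons c cs ih =>
    simp only [bDigits]
    split
    · simpa using Nat.le_succ_of_le ih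
    · simp

theorem bNum_len {l : List Char} {k : Nat} {r : List Char} (h : bNum l = some (k, r)) :
    r.length < l.length := by
  cases l with
  | nil => simp [bNum] at h
  | cons c cs =>
    simp only [bNum] at h
    split at h
    · simp only [Option.some.injEq, Prod.mk.injEq] at h
      simp [← h.2]
    · split at h
      · simp only [Option.some.injEq, Prod.mk.injEq] at h
        have := bDigits_len cs
        simp only [List.length_cons, ← h.2]
        omega
      · simp at h

-- greedy (?:\.number)* : chars consumed
def bTail : List Char → Nat
  | [] => 0
  | c :: cs =>
    if c = '.' then
      match h : bNum cs with
      | some (k, r) => 1 + k + bTail r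
      | none => 0
    else 0
termination_by l => l.length
decreasing_by simp; have := bNum_len h; omega

-- m.end() of the anchored regex on t, none if no match (the pattern is
-- deterministic: the number alternatives are disjoint on the first character and a
-- greedy digit run is never shortened to let '.' match, so no backtracking occurs
-- and this hand-written matcher is exact)
def bMatch (t : List Char) : Option Nat :=
  match bNum t with
  | none => none
  | some (k, r) => some (k + bTail r)

def numericoid_py_alt (value : String) (i : Int) : Option String × Int :=
  let s := value.toList
  let t := PySem.List.slice s (some i) none        -- value[i:]
  match bMatch t with
  | none => (none, i)
  | some m =>
    let e := i + (m : Int)                          -- end = i + m.end()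
    if e < (s.length : Int) ∧ PySem.List.pyGet? s e = some '.' then (none, e + 1)
    else (some (String.mk (PySem.List.slice s (some i) (some e))), e)

-- ===== PRECONDITION & SPEC =====
-- Pre_ excludes negative i, on which Python's negative-index wraparound makes A's
-- value accidental (and A raises IndexError for i < -len); B slices from the end there.
def Pre_numericoid_py (value : String) (i : Int) : Prop := 0 ≤ i
instance (value : String) (i : Int) : Decidable (Pre_numericoid_py value i) := by
  unfold Pre_numericoid_py; infer_instance

def pvWitness_numericoid_py : String × Int := ("1.23.4x", 0)

def Spec_numericoid_py (value : String) (i : Int) (out : Option String × Int) : Prop := out = numericoid_py_alt value i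
instance (value : String) (i : Int) (out : Option String × Int) : Decidable (Spec_numericoid_py value i out) := by unfold Spec_numericoid_py; infer_instance

-- ===== CLAIM (what is proved, stated in full; the proofs are below) =====
def Claim_equal_numericoid_py : Prop := ∀ (value : String) (i : Int), Dom_numericoid_py value i → Pre_numericoid_py value i → Spec_numericoid_py value i (numericoid_py value i)

-- ===== LEMMAS AND PROOFS =====

theorem bDigits_snd (l : List Char) : (bDigits l).2 = l.drop (bDigits l).1 := by
  induction l with
  | nil => simp [bDigits]
  | cons c cs ih =>
    simp only [bDigits]
    split
    · simpa using ih
    · simp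

theorem aScan_eq (s : List Char) (j : Nat) (fuel : Nat) (hf : s.length - j ≤ fuel) :
    aScan s (j : Int) fuel = ((j + (bDigits (s.drop j)).1 : Nat) : Int) := by
  induction fuel generalizing j with
  | zero =>
    -- j ≥ length, so the drop is empty
    have hj : s.length ≤ j := by omega
    simp [aScan, List.drop_eq_nil_of_le hj, bDigits]
  | succ fuel ih =>
    by_cases hj : j < s.length
    · have hd : s.drop j = s[j] :: s.drop (j + 1) := by
        rw [List.drop_eq_getElem_cons hj]
      by_cases hdj : aIsDigit s[j]
      · have : aScan s (j : Int) (fuel + 1) = aScan s ((j : Int) + 1) fuel := by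
          simp [aScan, hj, PySem.List.pyGet?_natCast, List.getElem?_eq_getElem hj, hdj]
        rw [this]
        have h1 : ((j : Int) + 1) = ((j + 1 : Nat) : Int) := by push_cast; ring
        rw [h1, ih (j + 1) (by omega)]
        rw [hd]
        simp only [bDigits, aIsDigit] at hdj ⊢
        rw [if_pos hdj]
        push_cast; ring
      · rw [hd]
        simp only [bDigits, aIsDigit] at hdj ⊢
        rw [if_neg hdj]
        simp [aScan, PySem.List.pyGet?_natCast, List.getElem?_eq_getElem hj, hdj,
          show ¬ aIsDigit s[j] = true from by simpa [aIsDigit] using hdj]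
    · have hj' : s.length ≤ j := by omega
      simp [aScan, List.drop_eq_nil_of_le hj', bDigits, hj']

theorem bDigits_le (l : List Char) : (bDigits l).1 ≤ l.length := by
  induction l with
  | nil => simp [bDigits]
  | cons c cs ih =>
    simp only [bDigits]
    split
    · simpa using ih
    · simp

theorem aNumber_none (s : List Char) (j : Nat) (h : bNum (s.drop j) = none) :
    aNumber s (j : Int) = (none, (j : Int)) := by
  by_cases hj : j < s.length
  · have hd : s.drop j = s[j] :: s.drop (j + 1) := List.drop_eq_getElem_cons hj
    rw [hd] at h
    simp only [bNum] at h
    split at h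
    · simp at h
    · split at h
      · simp at h
      · rename_i h0 hdig
        simp only [aNumber, PySem.List.pyGet?_natCast, List.getElem?_eq_getElem hj]
        rw [if_neg (by exact_mod_cast Nat.not_le.mpr hj)]
        have haid : ¬ aIsDigit s[j] = true := by simpa [aIsDigit] using hdig
        simp [haid]
  · simp [aNumber, show (s.length : Int) ≤ (j : Int) by exact_mod_cast Nat.le_of_not_lt hj]

theorem aNumber_some (s : List Char) (j : Nat) {k : Nat} {r : List Char}
    (h : bNum (s.drop j) = some (k, r)) :
    aNumber s (j : Int) =
      (some (PySem.List.slice s (some (j : Int)) (some ((j + k : Nat) : Int))), ((j + k : Nat) : Int))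
    ∧ r = s.drop (j + k) ∧ j + k ≤ s.length := by
  by_cases hj : j < s.length
  · have hd : s.drop j = s[j] :: s.drop (j + 1) := List.drop_eq_getElem_cons hj
    rw [hd] at h
    simp only [bNum] at h
    split at h
    · -- s[j] = '0'
      rename_i h0
      simp only [Option.some.injEq, Prod.mk.injEq] at h
      obtain ⟨hk, hr⟩ := h
      have hdig : aIsDigit s[j] = true := by simp [aIsDigit, h0]
      subst hk
      simp only [aNumber, PySem.List.pyGet?_natCast, List.getElem?_eq_getElem hj]
      rw [if_neg (by exact_mod_cast Nat.not_le.mpr hj)]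
      have hcast : ((j : Int) + 1) = ((j + 1 : Nat) : Int) := by push_cast; ring
      simp only [hdig, not_true, if_false, h0, if_pos rfl, hcast]
      exact ⟨rfl, hr.symm, by omega⟩
    · split at h
      · -- nonzero digit
        rename_i h0 hdig
        simp only [Option.some.injEq, Prod.mk.injEq] at h
        obtain ⟨hk, hr⟩ := h
        have hdig' : aIsDigit s[j] = true := by simpa [aIsDigit] using hdig
        simp only [aNumber, PySem.List.pyGet?_natCast, List.getElem?_eq_getElem hj]
        rw [if_neg (by exact_mod_cast Nat.not_le.mpr hj)]
        have hcast : ((j : Int) + 1) = ((j + 1 : Nat) : Int) := by push_cast; ring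
        simp only [hdig', not_true, if_false, if_neg h0, hcast]
        rw [aScan_eq s (j + 1) _ (by omega)]
        set d := (bDigits (s.drop (j + 1))).1 with hdd
        have hrr : r = s.drop (j + 1 + d) := by
          rw [← hr, bDigits_snd, List.drop_drop, ← hdd]
        have hdl : d ≤ s.length - (j + 1) := by
          have := bDigits_le (s.drop (j + 1))
          simpa [List.length_drop] using this
        refine ⟨?_, by rw [hrr]; congr 1; omega, by omega⟩
        have hjk : j + k = j + 1 + d := by omega
        rw [hjk]
      · simp at h
  · have : s.drop j = [] := List.drop_eq_nil_of_le (by omega)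
    rw [this] at h; simp [bNum] at h

theorem bNum_pos {l : List Char} {k : Nat} {r : List Char} (h : bNum l = some (k, r)) :
    1 ≤ k := by
  cases l with
  | nil => simp [bNum] at h
  | cons c cs =>
    simp only [bNum] at h
    split at h
    · simp only [Option.some.injEq, Prod.mk.injEq] at h; omega
    · split at h
      · simp only [Option.some.injEq, Prod.mk.injEq] at h; omega
      · simp at h

theorem bTail_dot_none (cs : List Char) (h : bNum cs = none) : bTail ('.' :: cs) = 0 := by
  simp only [bTail, if_pos rfl, if_true]
  split
  · rename_i k r h'; rw [h] at h'; cases h'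
  · rfl

theorem bTail_dot_some (cs : List Char) {k : Nat} {r : List Char}
    (h : bNum cs = some (k, r)) : bTail ('.' :: cs) = 1 + k + bTail r := by
  simp only [bTail, if_pos rfl, if_true]
  split
  · rename_i k' r' h'; rw [h] at h'; cases h'; rfl
  · rename_i h'; rw [h] at h'; cases h'

theorem bTail_not_dot (c : Char) (cs : List Char) (h : c ≠ '.') : bTail (c :: cs) = 0 := by
  simp [bTail, h]

theorem aLoop_eq (s : List Char) (start : Int) (fuel : Nat) (j : Nat)
    (hf : s.length + 1 - j ≤ fuel) :
    aLoop s start (j : Int) fuel =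
      (match bMatch (s.drop j) with
       | none => (none, (j : Int))
       | some m =>
         let e := j + m
         if e < s.length ∧ s[e]? = some '.' then (none, ((e + 1 : Nat) : Int))
         else (some (PySem.List.slice s (some start) (some ((e : Nat) : Int))), ((e : Nat) : Int))) := by
  induction fuel generalizing j with
  | zero =>
    have hj : s.length ≤ j := by omega
    simp [aLoop, List.drop_eq_nil_of_le hj, bMatch, bNum]
  | succ fuel ih =>
    match hn : bNum (s.drop j) with
    | none =>
      simp only [aLoop, aNumber_none s j hn, bMatch, hn]
    | some (k, r) =>
      obtain ⟨ha, hr, hle⟩ := aNumber_some s j hn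
      have hk1 : 1 ≤ k := bNum_pos hn
      simp only [aLoop, ha, bMatch, hn]
      by_cases hend : j + k = s.length
      · -- the number ends the string
        have hrnil : r = [] := by rw [hr, hend]; simp
        rw [if_pos (by exact_mod_cast hend.symm.le)]
        have ht : bTail r = 0 := by rw [hrnil]; simp [bTail]
        simp only [ht, Nat.add_zero]
        rw [if_neg (fun hc => absurd hc.1 (by omega))]
      · have hlt : j + k < s.length := by omega
        rw [if_neg (by exact_mod_cast Nat.not_le.mpr hlt)]
        have hdrop : r = s[j + k] :: s.drop (j + k + 1) := by
          rw [hr]; exact List.drop_eq_getElem_cons hlt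
        simp only [PySem.List.pyGet?_natCast, List.getElem?_eq_getElem hlt]
        by_cases hdot : s[j + k] = '.'
        · -- dangling dot: A advances past it and retries; recurse
          rw [if_neg (by simp [hdot])]
          have hcast : ((j + k : Nat) : Int) + 1 = ((j + k + 1 : Nat) : Int) := by push_cast; ring
          rw [hcast, ih (j + k + 1) (by omega)]
          match hn2 : bNum (s.drop (j + k + 1)) with
          | none =>
            -- the '.' rep fails: the match ends before the dot; B's guard gives (none, e+1)
            have ht : bTail r = 0 := by rw [hdrop, hdot]; exact bTail_dot_none _ hn2
            simp only [bMatch, hn2, ht, Nat.add_zero]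
            rw [if_pos ⟨hlt, by rw [List.getElem?_eq_getElem hlt, hdot]⟩]
          | some (k2, r2) =>
            have ht : bTail r = 1 + k2 + bTail r2 := by
              rw [hdrop, hdot]; exact bTail_dot_some _ hn2
            simp only [bMatch, hn2, ht]
            have he : j + k + 1 + (k2 + bTail r2) = j + (k + (1 + k2 + bTail r2)) := by omega
            rw [he]
        · -- next char is not '.': both stop at the end of the number
          rw [if_pos hdot]
          have ht : bTail r = 0 := by rw [hdrop]; exact bTail_not_dot _ _ hdot
          simp only [ht, Nat.add_zero]
          rw [if_neg (by rw [List.getElem?_eq_getElem hlt]; simp [hdot])]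

theorem main_eq (value : String) (i : Int) (hpre : 0 ≤ i) :
    numericoid_py value i = numericoid_py_alt value i := by
  obtain ⟨j, rfl⟩ : ∃ j : Nat, i = (j : Int) := ⟨i.toNat, (Int.toNat_of_nonneg hpre).symm⟩
  simp only [numericoid_py, numericoid_py_alt]
  rw [aLoop_eq value.toList (j : Int) (2 * value.toList.length + 2) j (by omega)]
  rw [PySem.List.slice_from_natCast]
  match hm : bMatch (value.toList.drop j) with
  | none => simp
  | some m =>
    simp only
    have hc : (j : Int) + (m : Int) = ((j + m : Nat) : Int) := by push_cast; ring
    rw [hc, PySem.List.pyGet?_natCast]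
    by_cases h : j + m < value.toList.length ∧ value.toList[j + m]? = some '.'
    · rw [if_pos h, if_pos ⟨by exact_mod_cast h.1, h.2⟩]
      simp only [Option.map_none, Prod.mk.injEq, true_and]
      push_cast; ring
    · rw [if_neg h,
        if_neg (fun hc2 => h ⟨by exact_mod_cast hc2.1, hc2.2⟩)]
      simp

-- ===== VERDICT (by name: the statement is the Claim_ definition above) =====
theorem numericoid_py_spec : Claim_equal_numericoid_py := by
  intro value i _ hpre
  exact main_eq value i hpre
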